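-- pv_equiv track=rewrite | github.com/mpsingh1/Advent-of-Code-2021 | AOC_15.py | scale_map
-- ===== SOURCE A (Python) =====
-- def scale_map(some_array, multiplier):
--     R = len(some_array)
--     C = len(some_array[0])
--     new_R = R * multiplier
--     new_C = C * multiplier
--     new_array = [[0] * new_C for row in range(new_R)]
--     for r in range(new_R):
--         for c in range(new_C):
--             new_array[r][c] = (some_array[r % R][c % C] + c // C + r // R) % 9
--             if new_array[r][c] == 0:
--                 new_array[r][c] = 9
--     return new_array
-- ===== SOURCE B (Python) =====
-- def scale_map(some_array, multiplier):
--     C = len(some_array[0])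
--     # the column layout of every output row is the same: tile index and source column
--     col_pattern = [(tc, c0) for tc in range(multiplier) for c0 in range(C)]
--     new_rows = []
--     for tr in range(multiplier):
--         for row in some_array:
--             new_rows.append([((row[c0] + tr + tc) % 9 or 9) for tc, c0 in col_pattern])
--     return new_rows
-- ===== Notes on version B (the rewrite author's own statement) =====
-- stated objective: alternative
-- what changed: B builds the scaled grid tile by tile - looping over tile rows and source rows and concatenating per-tile comprehensions - instead of A's preallocated flat scan over the full new_R x new_C index space that recovers the tile offset of each cell with % and //.
import Mathlib
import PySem

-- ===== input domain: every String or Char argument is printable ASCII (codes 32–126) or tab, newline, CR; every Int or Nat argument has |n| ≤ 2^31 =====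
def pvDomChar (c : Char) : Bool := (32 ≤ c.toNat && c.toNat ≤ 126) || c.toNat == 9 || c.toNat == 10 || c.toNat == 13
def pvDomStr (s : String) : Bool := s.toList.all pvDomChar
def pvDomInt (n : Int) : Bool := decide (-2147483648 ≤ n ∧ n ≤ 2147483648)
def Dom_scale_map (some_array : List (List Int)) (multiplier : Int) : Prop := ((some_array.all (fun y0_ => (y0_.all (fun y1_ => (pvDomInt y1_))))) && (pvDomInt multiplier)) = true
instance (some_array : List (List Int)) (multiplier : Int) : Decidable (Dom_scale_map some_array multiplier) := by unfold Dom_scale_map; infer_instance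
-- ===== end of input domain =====

-- B builds the scaled grid tile-row by tile-row (per-tile comprehensions concatenated) instead of
-- A's flat scan over the full index space with %-and-// index recovery; objective: alternative decomposition.

-- ===== PORT A =====
def scale_map (some_array : List (List Int)) (multiplier : Int) : List (List Int) :=
  let R : Int := (some_array.length : Int)
  let C : Int := ((PySem.List.pyGetD some_array 0 []).length : Int)
  let new_R : Int := R * multiplier
  let new_C : Int := C * multiplier
  (PySem.List.pyRange 0 new_R 1).map (fun r =>
    (PySem.List.pyRange 0 new_C 1).map (fun c =>
      let v : Int := PySem.Int.mod
        (PySem.List.pyGetD (PySem.List.pyGetD some_array (PySem.Int.mod r R) []) (PySem.Int.mod c C) 0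
          + PySem.Int.floordiv c C + PySem.Int.floordiv r R) 9
      if v = 0 then 9 else v))

-- ===== PORT B =====
def scale_map_alt (some_array : List (List Int)) (multiplier : Int) : List (List Int) :=
  let C : Int := ((PySem.List.pyGetD some_array 0 []).length : Int)
  let col_pattern : List (Int × Int) :=
    (PySem.List.pyRange 0 multiplier 1).flatMap (fun tc =>
      (PySem.List.pyRange 0 C 1).map (fun c0 => (tc, c0)))
  (PySem.List.pyRange 0 multiplier 1).foldl (fun new_rows tr =>
    some_array.foldl (fun acc row =>
      acc ++ [col_pattern.map (fun p =>
        let w : Int := PySem.Int.mod (PySem.List.pyGetD row p.2 0 + tr + p.1) 9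
        if w = 0 then 9 else w)]) new_rows) []

-- ===== PRECONDITION & SPEC =====
-- Pre_ excludes exactly the inputs where Python A raises IndexError: the empty grid
-- (some_array[0] fails) and, when multiplier > 0, some row shorter than the first row's width.
def Pre_scale_map (some_array : List (List Int)) (multiplier : Int) : Prop :=
  some_array ≠ [] ∧
  (0 < multiplier → ∀ row ∈ some_array, (some_array.headI).length ≤ row.length)
instance (some_array : List (List Int)) (multiplier : Int) : Decidable (Pre_scale_map some_array multiplier) := by unfold Pre_scale_map; infer_instance

def pvWitness_scale_map : List (List Int) × Int := ([[1, 8], [9, 2]], 2)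

def Spec_scale_map (some_array : List (List Int)) (multiplier : Int) (out : List (List Int)) : Prop := out = scale_map_alt some_array multiplier
instance (some_array : List (List Int)) (multiplier : Int) (out : List (List Int)) : Decidable (Spec_scale_map some_array multiplier out) := by unfold Spec_scale_map; infer_instance

-- ===== CLAIM (what is proved, stated in full; the proofs are below) =====
def Claim_equal_scale_map : Prop := ∀ (some_array : List (List Int)) (multiplier : Int), Dom_scale_map some_array multiplier → Pre_scale_map some_array multiplier → Spec_scale_map some_array multiplier (scale_map some_array multiplier)

-- ===== LEMMAS AND PROOFS =====

lemma mod_block (n t i : Int) (h0 : 0 ≤ i) (hi : i < n) :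
    PySem.Int.mod (t * n + i) n = i := by
  have hn : 0 < n := lt_of_le_of_lt h0 hi
  rw [PySem.Int.mod_eq_emod_of_pos hn, show t * n + i = i + n * t by ring,
    Int.add_mul_emod_self_left, Int.emod_eq_of_lt h0 hi]

lemma floordiv_block (n t i : Int) (h0 : 0 ≤ i) (hi : i < n) :
    PySem.Int.floordiv (t * n + i) n = t := by
  have hn : 0 < n := lt_of_le_of_lt h0 hi
  rw [PySem.Int.floordiv_eq_iff_of_pos hn]
  constructor <;> nlinarith

-- flat range [0, n*M) split into M consecutive blocks of width n (Nat exponent form)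
lemma pyRange_mul_flat_nat {α : Type} (n : Int) (hn : 0 ≤ n) (M : Nat) (f : Int → α) :
    (PySem.List.pyRange 0 (n * (M : Int)) 1).map f
      = (PySem.List.pyRange 0 (M : Int) 1).flatMap
          (fun t => (PySem.List.pyRange 0 n 1).map (fun i => f (t * n + i))) := by
  induction M with
  | zero => simp [PySem.List.pyRange_one_eq_nil]
  | succ M ih =>
    have h1 : ((M + 1 : Nat) : Int) = (M : Int) + 1 := by push_cast; ring
    rw [h1, PySem.List.pyRange_one_succ_right (by positivity),
      show n * ((M : Int) + 1) = n * (M : Int) + n by ring,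
      PySem.List.pyRange_one_append 0 (n * (M : Int)) (n * (M : Int) + n) (by positivity) (by omega),
      List.map_append, List.flatMap_append, ih]
    congr 1
    simp only [List.flatMap_cons, List.flatMap_nil, List.append_nil]
    rw [PySem.List.pyRange_one (n * (M : Int)) (n * (M : Int) + n),
      PySem.List.pyRange_one 0 n, List.map_map, List.map_map]
    simp only [show n * (M : Int) + n - n * (M : Int) = n - 0 by ring]
    exact List.map_congr_left (fun k _ => by simp only [Function.comp]; ring_nf)

-- flat range [0, n*m) split into m consecutive blocks of width n
lemma pyRange_mul_flat {α : Type} (n m : Int) (hn : 0 ≤ n) (f : Int → α) :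
    (PySem.List.pyRange 0 (n * m) 1).map f
      = (PySem.List.pyRange 0 m 1).flatMap
          (fun t => (PySem.List.pyRange 0 n 1).map (fun i => f (t * n + i))) := by
  rcases le_or_gt m 0 with hm | hm
  · rw [PySem.List.pyRange_one_eq_nil hm, PySem.List.pyRange_one_eq_nil (by nlinarith : n * m ≤ 0)]
    simp
  · have : m = ((m.toNat : Nat) : Int) := (Int.toNat_of_nonneg hm.le).symm
    rw [this]; exact pyRange_mul_flat_nat n hn m.toNat f

-- tile-row t of A (flat indices t*R + i, i < R) equals B's rows built from some_array in tile-row t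
lemma row_eq (a : List (List Int)) (m t : Int) :
    (PySem.List.pyRange 0 ((a.length : Int)) 1).map (fun i =>
      (PySem.List.pyRange 0 (((PySem.List.pyGetD a 0 []).length : Int) * m) 1).map (fun c =>
        let v : Int := PySem.Int.mod
          (PySem.List.pyGetD (PySem.List.pyGetD a (PySem.Int.mod (t * (a.length : Int) + i) (a.length : Int)) [])
              (PySem.Int.mod c ((PySem.List.pyGetD a 0 []).length : Int)) 0
            + PySem.Int.floordiv c ((PySem.List.pyGetD a 0 []).length : Int)
            + PySem.Int.floordiv (t * (a.length : Int) + i) (a.length : Int)) 9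
        if v = 0 then 9 else v))
    = a.map (fun row =>
        ((PySem.List.pyRange 0 m 1).flatMap (fun tc =>
          (PySem.List.pyRange 0 ((PySem.List.pyGetD a 0 []).length : Int) 1).map (fun c0 => (tc, c0)))).map (fun p =>
            let w : Int := PySem.Int.mod (PySem.List.pyGetD row p.2 0 + t + p.1) 9
            if w = 0 then 9 else w)) := by
  simp only [List.map_flatMap, List.map_map, Function.comp_def]
  set C : Int := ((PySem.List.pyGetD a 0 []).length : Int) with hC
  apply List.ext_getElem
  · simp [PySem.List.length_pyRange_one]
  · intro k h1 h2
    have hk : k < a.length := by simpa using h2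
    simp only [List.getElem_map, PySem.List.getElem_pyRange_one, zero_add]
    rw [mod_block _ t k (by positivity) (by exact_mod_cast hk),
        floordiv_block _ t k (by positivity) (by exact_mod_cast hk),
        PySem.List.pyGetD_natCast, List.getD_eq_getElem _ _ hk]
    rw [pyRange_mul_flat C m (by positivity)]
    congr 1
    funext tc
    apply List.map_congr_left
    intro i hi
    rw [PySem.List.mem_pyRange_one] at hi
    rw [mod_block C tc i hi.1 hi.2, floordiv_block C tc i hi.1 hi.2]
    ring_nf

-- ===== VERDICT (by name: the statement is the Claim_ definition above) =====
theorem scale_map_spec : Claim_equal_scale_map := by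
  intro a m _ _
  unfold Spec_scale_map
  simp only [scale_map, scale_map_alt, PySem.List.foldl_append_singleton_eq_map]
  rw [PySem.List.foldl_append_eq_flatMap, List.nil_append,
    pyRange_mul_flat (a.length : Int) m (by positivity)]
  congr 1
  funext t
  exact row_eq a m t
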